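-- pv_equiv track=rewrite | github.com/DianeBury/AdventOfCode | 2023/03/solve.py | get_periphery
-- ===== SOURCE A (Python) =====
-- def get_periphery(number: dict, nb_rows: int, nb_cols: int) -> list:
--     length = number["length"]
--     row = number["row"]
--     col = number["col"]
--     points = []
--     for i in range(row - 1, row + 2):
--         for j in range(col - 1, col + length + 1):
--             if not out_of_range(nb_rows, nb_cols, (i, j)):
--                 points.append((i, j))
--     return points
--
-- def out_of_range(nb_rows: int, nb_cols: int, point: list) -> bool:
--     if point[0] < 0 or point[0] >= nb_rows or point[1] < 0 or point[1] >= nb_cols: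
--         return True
--     return False
-- ===== SOURCE B (Python) =====
-- def get_periphery(number: dict, nb_rows: int, nb_cols: int) -> list:
--     i0 = max(0, number["row"] - 1)
--     j0 = max(0, number["col"] - 1)
--     ni = min(nb_rows, number["row"] + 2) - i0
--     nj = min(nb_cols, number["col"] + number["length"] + 1) - j0
--     if ni <= 0 or nj <= 0:
--         return []
--     return [(i0 + k // nj, j0 + k % nj) for k in range(ni * nj)]
-- ===== Notes on version B (the rewrite author's own statement) =====
-- stated objective: alternative
-- what changed: B replaces A's nested row/column scan with per-cell bounds filtering by a flat single loop: it computes the clamped rectangle's origin and dimensions (ni x nj) and generates cell k as (i0 + k//nj, j0 + k%nj) via divmod indexing over range(ni*nj).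
import Mathlib
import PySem

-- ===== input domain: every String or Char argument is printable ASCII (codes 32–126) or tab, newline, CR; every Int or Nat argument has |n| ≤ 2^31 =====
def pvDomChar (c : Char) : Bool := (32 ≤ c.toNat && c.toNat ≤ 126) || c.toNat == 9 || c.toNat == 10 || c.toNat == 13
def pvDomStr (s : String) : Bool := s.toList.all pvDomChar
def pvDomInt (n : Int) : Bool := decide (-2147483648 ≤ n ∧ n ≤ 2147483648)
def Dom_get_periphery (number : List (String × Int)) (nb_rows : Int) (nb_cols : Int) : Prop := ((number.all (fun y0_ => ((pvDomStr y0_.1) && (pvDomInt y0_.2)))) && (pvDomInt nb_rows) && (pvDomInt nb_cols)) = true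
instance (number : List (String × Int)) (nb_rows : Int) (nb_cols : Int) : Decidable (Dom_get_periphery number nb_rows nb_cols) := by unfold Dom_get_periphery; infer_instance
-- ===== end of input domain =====

-- B drops A's nested row/column scan with a per-cell bounds test: it computes the clamped
-- rectangle's origin and size (ni × nj) and emits cell k of one flat loop as
-- (i0 + k // nj, j0 + k % nj) (objective: alternative decomposition).

-- ===== PORT A =====
def out_of_range (nb_rows : Int) (nb_cols : Int) (point : Int × Int) : Bool :=
  if point.1 < 0 || point.1 ≥ nb_rows || point.2 < 0 || point.2 ≥ nb_cols then true else false

def get_periphery (number : List (String × Int)) (nb_rows : Int) (nb_cols : Int) : List (Int × Int) :=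
  match number.lookup "length", number.lookup "row", number.lookup "col" with
  | some length, some row, some col =>
      (PySem.List.pyRange (row - 1) (row + 2) 1).foldl (fun points i =>
        (PySem.List.pyRange (col - 1) (col + length + 1) 1).foldl (fun points j =>
          if out_of_range nb_rows nb_cols (i, j) then points else points ++ [(i, j)]) points) []
  | _, _, _ => []  -- unreachable under Pre_ (Python raises KeyError)

-- ===== PORT B =====
def get_periphery_alt (number : List (String × Int)) (nb_rows : Int) (nb_cols : Int) : List (Int × Int) :=
  match number.lookup "length" with
  | none => []  -- unreachable under Pre_ (Python raises KeyError)
  | some length =>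
    match number.lookup "row" with
    | none => []
    | some row =>
      match number.lookup "col" with
      | none => []
      | some col =>
        let i0 := max 0 (row - 1)
        let j0 := max 0 (col - 1)
        let ni := min nb_rows (row + 2) - i0
        let nj := min nb_cols (col + length + 1) - j0
        if ni ≤ 0 ∨ nj ≤ 0 then []
        else (PySem.List.pyRange 0 (ni * nj) 1).map
          (fun k => (i0 + PySem.Int.floordiv k nj, j0 + PySem.Int.mod k nj))

-- ===== PRECONDITION & SPEC =====
-- Pre_ excludes only inputs whose dict lacks one of the keys "length"/"row"/"col": Python A raises KeyError there.
def Pre_get_periphery (number : List (String × Int)) (nb_rows : Int) (nb_cols : Int) : Prop :=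
  (number.lookup "length").isSome ∧ (number.lookup "row").isSome ∧ (number.lookup "col").isSome
instance (number : List (String × Int)) (nb_rows : Int) (nb_cols : Int) : Decidable (Pre_get_periphery number nb_rows nb_cols) := by unfold Pre_get_periphery; infer_instance

def pvWitness_get_periphery : (List (String × Int)) × Int × Int :=
  ([("length", 3), ("row", 1), ("col", 1)], 5, 10)

def Spec_get_periphery (number : List (String × Int)) (nb_rows : Int) (nb_cols : Int) (out : List (Int × Int)) : Prop := out = get_periphery_alt number nb_rows nb_cols
instance (number : List (String × Int)) (nb_rows : Int) (nb_cols : Int) (out : List (Int × Int)) : Decidable (Spec_get_periphery number nb_rows nb_cols out) := by unfold Spec_get_periphery; infer_instance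

-- ===== CLAIM (what is proved, stated in full; the proofs are below) =====
def Claim_equal_get_periphery : Prop := ∀ (number : List (String × Int)) (nb_rows : Int) (nb_cols : Int), Dom_get_periphery number nb_rows nb_cols → Pre_get_periphery number nb_rows nb_cols → Spec_get_periphery number nb_rows nb_cols (get_periphery number nb_rows nb_cols)

-- ===== LEMMAS AND PROOFS =====

-- Filtering a unit-step range by a lower and an upper bound is the clamped range.
lemma pv_filter_pyRange_clamp (lo hi a b : Int) :
    (PySem.List.pyRange a b 1).filter (fun x => decide (lo ≤ x) && decide (x < hi))
      = PySem.List.pyRange (max lo a) (min hi b) 1 := by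
  induction h : (b - a).toNat generalizing a with
  | zero =>
      rw [PySem.List.pyRange_one_eq_nil (by omega), PySem.List.pyRange_one_eq_nil (by omega)]
      rfl
  | succ n ih =>
      rw [PySem.List.pyRange_one_cons (by omega), List.filter_cons]
      by_cases hc : lo ≤ a ∧ a < hi
      · simp only [hc.1, hc.2, decide_true, Bool.and_self, if_true]
        rw [ih (a + 1) (by omega),
          show max lo (a + 1) = a + 1 by omega,
          ← PySem.List.pyRange_one_cons (by omega),
          show max lo a = a by omega]
      · have : (decide (lo ≤ a) && decide (a < hi)) = false := by
          simp only [Bool.and_eq_false_iff, decide_eq_false_iff_not]; omega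
        rw [this, if_neg (by simp), ih (a + 1) (by omega)]
        rcases not_and_or.mp hc with h1 | h2
        · congr 1; omega
        · rw [PySem.List.pyRange_one_eq_nil (by omega), PySem.List.pyRange_one_eq_nil (by omega)]

-- flatMap of a guarded function is flatMap over the filtered list.
lemma pv_flatMap_ite {α β : Type} (l : List α) (c : α → Bool) (h : α → List β) :
    l.flatMap (fun x => if c x then h x else []) = (l.filter c).flatMap h := by
  induction l with
  | nil => rfl
  | cons x xs ih =>
      rw [List.flatMap_cons, List.filter_cons]
      by_cases hx : c x = true
      · simp [hx, ih]
      · simp [hx, ih]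

-- One row block of B's flat enumeration: for k ∈ [n·nj, n·nj+nj), k // nj = n and k % nj = k − n·nj.
lemma pv_block (i0 j0 nj : Int) (hnj : 0 < nj) (n : Int) :
    (PySem.List.pyRange (n * nj) (n * nj + nj) 1).map
        (fun k => (i0 + PySem.Int.floordiv k nj, j0 + PySem.Int.mod k nj))
      = (PySem.List.pyRange j0 (j0 + nj) 1).map (fun j => (i0 + n, j)) := by
  rw [PySem.List.pyRange_one (n * nj), PySem.List.pyRange_one j0]
  rw [show (n * nj + nj - n * nj).toNat = (j0 + nj - j0).toNat by omega]
  rw [List.map_map, List.map_map]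
  apply List.map_congr_left
  intro t ht
  have htn : (t : Int) < nj := by
    have := List.mem_range.mp ht; omega
  have ht0 : (0 : Int) ≤ (t : Int) := Int.natCast_nonneg t
  have hdiv : PySem.Int.floordiv (n * nj + t) nj = n := by
    rw [PySem.Int.floordiv_eq_iff_of_pos hnj]
    constructor
    · linarith
    · have : (n + 1) * nj = n * nj + nj := by ring
      linarith [this.ge]
  have hmod : PySem.Int.mod (n * nj + t) nj = t := by
    have h := PySem.Int.floordiv_mul_add_mod (n * nj + t) nj
    rw [hdiv] at h
    linarith
  simp only [Function.comp]
  rw [hdiv, hmod]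

-- The whole grid: row-major flatMap over an m × nj rectangle equals one flat divmod-indexed loop.
lemma pv_grid (i0 j0 nj : Int) (hnj : 0 < nj) (m : Nat) :
    (PySem.List.pyRange i0 (i0 + m) 1).flatMap
        (fun i => (PySem.List.pyRange j0 (j0 + nj) 1).map (fun j => (i, j)))
      = (PySem.List.pyRange 0 (m * nj) 1).map
          (fun k => (i0 + PySem.Int.floordiv k nj, j0 + PySem.Int.mod k nj)) := by
  induction m with
  | zero =>
      rw [show (i0 + (0 : Nat) : Int) = i0 by omega, PySem.List.pyRange_one_eq_nil (le_refl i0),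
        show ((0 : Nat) : Int) * nj = 0 by omega, PySem.List.pyRange_one_eq_nil (le_refl 0)]
      rfl
  | succ n ih =>
      rw [show (i0 + (n + 1 : Nat) : Int) = (i0 + n) + 1 by push_cast; ring,
        PySem.List.pyRange_one_succ_right (by omega), List.flatMap_append, ih]
      rw [show ((n + 1 : Nat) : Int) * nj = (n : Int) * nj + nj by push_cast; ring]
      rw [PySem.List.pyRange_one_append 0 ((n : Int) * nj) ((n : Int) * nj + nj)
        (by positivity) (by omega), List.map_append]
      rw [pv_block i0 j0 nj hnj n]
      simp

-- ===== VERDICT (by name: the statement is the Claim_ definition above) =====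
theorem get_periphery_spec : Claim_equal_get_periphery := by
  intro number nr nc _ hpre
  obtain ⟨h1, h2, h3⟩ := hpre
  obtain ⟨len, hl⟩ := Option.isSome_iff_exists.mp h1
  obtain ⟨row, hr⟩ := Option.isSome_iff_exists.mp h2
  obtain ⟨col, hc⟩ := Option.isSome_iff_exists.mp h3
  unfold Spec_get_periphery get_periphery get_periphery_alt
  rw [hl, hr, hc]
  simp only []
  -- inner loop of A: append-if fold = filter then map
  have hinner : ∀ (i : Int) (acc : List (Int × Int)),
      (PySem.List.pyRange (col - 1) (col + len + 1) 1).foldl (fun points j =>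
        if out_of_range nr nc (i, j) then points else points ++ [(i, j)]) acc
      = acc ++ ((PySem.List.pyRange (col - 1) (col + len + 1) 1).filter
          (fun j => !out_of_range nr nc (i, j))).map (fun j => (i, j)) := by
    intro i acc
    have hf : (fun (points : List (Int × Int)) j =>
        if out_of_range nr nc (i, j) then points else points ++ [(i, j)])
        = (fun points j => if (!out_of_range nr nc (i, j)) = true
            then points ++ [(i, j)] else points) := by
      funext pts j
      cases h : out_of_range nr nc (i, j)
      · simp [h]
      · simp [h]
    rw [hf, PySem.List.foldl_append_if]
  -- outer loop of A: append fold = flatMap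
  have houter : (PySem.List.pyRange (row - 1) (row + 2) 1).foldl (fun points i =>
        (PySem.List.pyRange (col - 1) (col + len + 1) 1).foldl (fun points j =>
          if out_of_range nr nc (i, j) then points else points ++ [(i, j)]) points) []
      = (PySem.List.pyRange (row - 1) (row + 2) 1).flatMap (fun i =>
          ((PySem.List.pyRange (col - 1) (col + len + 1) 1).filter
            (fun j => !out_of_range nr nc (i, j))).map (fun j => (i, j))) := by
    rw [show (fun (points : List (Int × Int)) i =>
        (PySem.List.pyRange (col - 1) (col + len + 1) 1).foldl (fun points j =>
          if out_of_range nr nc (i, j) then points else points ++ [(i, j)]) points)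
      = (fun points i => points ++ ((PySem.List.pyRange (col - 1) (col + len + 1) 1).filter
          (fun j => !out_of_range nr nc (i, j))).map (fun j => (i, j)))
      from funext fun pts => funext fun i => hinner i pts]
    rw [PySem.List.foldl_append_eq_flatMap]
    simp
  rw [houter]
  -- each row's filtered cells: empty off-grid, a clamped range on-grid
  have hrow : ∀ i : Int,
      ((PySem.List.pyRange (col - 1) (col + len + 1) 1).filter
        (fun j => !out_of_range nr nc (i, j))).map (fun j => (i, j))
      = if (decide (0 ≤ i) && decide (i < nr)) = true
          then (PySem.List.pyRange (max 0 (col - 1)) (min nc (col + len + 1)) 1).map (fun j => (i, j))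
          else [] := by
    intro i
    by_cases hi : 0 ≤ i ∧ i < nr
    · rw [if_pos (by simp [hi.1, hi.2])]
      congr 1
      rw [List.filter_congr (fun j _ => show (!out_of_range nr nc (i, j))
            = (decide (0 ≤ j) && decide (j < nc)) by
          simp only [out_of_range]
          by_cases hj : 0 ≤ j ∧ j < nc
          · rw [if_neg (by simp; omega)]; simp [hj.1, hj.2]
          · rw [if_pos (by simp; omega)]
            simp only [Bool.not_true]
            symm; simp only [Bool.and_eq_false_iff, decide_eq_false_iff_not]; omega)]
      exact pv_filter_pyRange_clamp 0 nc (col - 1) (col + len + 1)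
    · rw [if_neg (by simp; omega), List.map_eq_nil_iff, List.filter_eq_nil_iff]
      intro j _
      simp only [out_of_range]
      rw [if_pos (by simp; omega)]
      simp
  rw [show (fun i => ((PySem.List.pyRange (col - 1) (col + len + 1) 1).filter
        (fun j => !out_of_range nr nc (i, j))).map (fun j => (i, j)))
      = (fun i => if (decide (0 ≤ i) && decide (i < nr)) = true
          then (PySem.List.pyRange (max 0 (col - 1)) (min nc (col + len + 1)) 1).map (fun j => (i, j))
          else []) from funext hrow]
  rw [pv_flatMap_ite, pv_filter_pyRange_clamp 0 nr (row - 1) (row + 2)]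
  -- now: A = flatMap over the clamped rectangle; compare with B's flat divmod loop
  set i0 := max 0 (row - 1) with hi0
  set j0 := max 0 (col - 1) with hj0
  set iHi := min nr (row + 2) with hiHi
  set jHi := min nc (col + len + 1) with hjHi
  by_cases hdeg : iHi - i0 ≤ 0 ∨ jHi - j0 ≤ 0
  · rw [if_pos hdeg]
    rcases hdeg with h | h
    · rw [show PySem.List.pyRange i0 iHi 1 = [] from PySem.List.pyRange_one_eq_nil (by omega)]
      rfl
    · rw [show PySem.List.pyRange j0 jHi 1 = [] from PySem.List.pyRange_one_eq_nil (by omega)]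
      simp
  · rw [if_neg hdeg]
    rw [not_or, not_le, not_le] at hdeg
    obtain ⟨hni, hnj⟩ := hdeg
    have hg := pv_grid i0 j0 (jHi - j0) (by omega) (iHi - i0).toNat
    rw [show j0 + (jHi - j0) = jHi by ring,
      show (i0 + (((iHi - i0).toNat : Int))) = iHi by omega,
      show (((iHi - i0).toNat : Int)) * (jHi - j0) = (iHi - i0) * (jHi - j0) by
        rw [show (((iHi - i0).toNat : Int)) = iHi - i0 by omega]] at hg
    exact hg
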